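-- pv_equiv track=rewrite | github.com/alirezaomidi/AFminD | AFminD/data/pairing.py | _pair_regions
-- ===== SOURCE A (Python) =====
-- def _pair_regions(regions1, regions2):
--     fasta = [
--         (
--             f"{region1_name}-{region1_start}-{region1_end}_{region2_name}-{region2_start}-{region2_end}",
--             f"{region1_seq}:{region2_seq}",
--         )
--         for region1_name, region1_start, region1_end, region1_seq in regions1
--         for region2_name, region2_start, region2_end, region2_seq in regions2
--     ]
--
--     return fasta
-- ===== SOURCE B (Python) =====
-- def _pair_regions(regions1, regions2):
--     # Single flat loop over one index k; divmod recovers the (outer, inner) pair.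
--     m = len(regions2)
--     out = []
--     for k in range(len(regions1) * m):
--         n1, s1, e1, q1 = regions1[k // m]
--         n2, s2, e2, q2 = regions2[k % m]
--         out.append((f"{n1}-{s1}-{e1}_{n2}-{s2}-{e2}", f"{q1}:{q2}"))
--     return out
-- ===== Notes on version B (the rewrite author's own statement) =====
-- stated objective: alternative
-- what changed: B replaces A's nested double comprehension by a single flat loop over one index k in range(len(regions1)*len(regions2)), recovering the two regions by divmod (k//m, k%m) and indexing, instead of iterating the two lists directly.
import Mathlib
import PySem

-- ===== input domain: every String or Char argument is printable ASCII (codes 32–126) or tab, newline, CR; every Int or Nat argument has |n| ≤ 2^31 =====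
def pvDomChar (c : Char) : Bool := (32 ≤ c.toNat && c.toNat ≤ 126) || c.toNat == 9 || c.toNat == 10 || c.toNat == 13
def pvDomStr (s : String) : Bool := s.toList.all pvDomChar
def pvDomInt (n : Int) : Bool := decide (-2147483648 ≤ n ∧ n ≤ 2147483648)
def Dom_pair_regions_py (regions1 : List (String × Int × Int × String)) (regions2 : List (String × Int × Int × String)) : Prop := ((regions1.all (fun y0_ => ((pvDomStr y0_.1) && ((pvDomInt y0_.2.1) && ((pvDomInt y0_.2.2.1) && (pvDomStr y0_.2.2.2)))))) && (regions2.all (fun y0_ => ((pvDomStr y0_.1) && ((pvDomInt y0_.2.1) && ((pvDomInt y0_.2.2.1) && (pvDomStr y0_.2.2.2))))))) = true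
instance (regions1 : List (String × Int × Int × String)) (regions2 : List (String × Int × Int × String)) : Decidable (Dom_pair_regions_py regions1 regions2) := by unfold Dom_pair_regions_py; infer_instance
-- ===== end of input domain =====

-- B replaces A's nested double comprehension by one flat loop over a single index k, recovering the region pair by divmod (alternative decomposition, same cost).
-- ===== PORT A =====
def pair_regions_py (regions1 : List (String × Int × Int × String)) (regions2 : List (String × Int × Int × String)) : List (String × String) :=
  regions1.flatMap (fun r1 =>
    regions2.map (fun r2 =>
      (r1.1 ++ "-" ++ PySem.Int.toStr r1.2.1 ++ "-" ++ PySem.Int.toStr r1.2.2.1 ++ "_" ++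
         r2.1 ++ "-" ++ PySem.Int.toStr r2.2.1 ++ "-" ++ PySem.Int.toStr r2.2.2.1,
       r1.2.2.2 ++ ":" ++ r2.2.2.2)))

-- ===== PORT B =====
-- B: one flat loop k ∈ range(n*m); regions1[k//m], regions2[k%m]. The proof below
-- shows the indices are always in range, so pyGetD's default (a total-ness guard,
-- Python raises only on out-of-range, which never happens here) is never used.
def pvB_default : String × Int × Int × String := ("", 0, 0, "")

def pvB_entry (regions1 : List (String × Int × Int × String)) (regions2 : List (String × Int × Int × String)) (k : Int) : String × String :=
  match PySem.List.pyGetD regions1 (PySem.Int.floordiv k regions2.length) pvB_default,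
        PySem.List.pyGetD regions2 (PySem.Int.mod k regions2.length) pvB_default with
  | r1, r2 =>
      (r1.1 ++ "-" ++ PySem.Int.toStr r1.2.1 ++ "-" ++ PySem.Int.toStr r1.2.2.1 ++ "_" ++
         r2.1 ++ "-" ++ PySem.Int.toStr r2.2.1 ++ "-" ++ PySem.Int.toStr r2.2.2.1,
       r1.2.2.2 ++ ":" ++ r2.2.2.2)

def pair_regions_py_alt (regions1 : List (String × Int × Int × String)) (regions2 : List (String × Int × Int × String)) : List (String × String) :=
  (PySem.List.pyRange 0 ((regions1.length : Int) * (regions2.length : Int)) 1).foldl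
    (fun out k => out ++ [pvB_entry regions1 regions2 k]) []

-- ===== PRECONDITION & SPEC =====
def Spec_pair_regions_py (regions1 : List (String × Int × Int × String)) (regions2 : List (String × Int × Int × String)) (out : List (String × String)) : Prop := out = pair_regions_py_alt regions1 regions2
instance (regions1 : List (String × Int × Int × String)) (regions2 : List (String × Int × Int × String)) (out : List (String × String)) : Decidable (Spec_pair_regions_py regions1 regions2 out) := by unfold Spec_pair_regions_py; infer_instance

-- ===== CLAIM (what is proved, stated in full; the proofs are below) =====
def Claim_equal_pair_regions_py : Prop := ∀ (regions1 : List (String × Int × Int × String)) (regions2 : List (String × Int × Int × String)), Dom_pair_regions_py regions1 regions2 → Spec_pair_regions_py regions1 regions2 (pair_regions_py regions1 regions2)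

-- ===== LEMMAS AND PROOFS =====

-- Over the whole list: range (xs.length) indexed back gives xs.
theorem map_getD_range {α β : Type} (xs : List α) (d : α) (F : α → β) :
    (List.range xs.length).map (fun j => F (xs.getD j d)) = xs.map F := by
  apply List.ext_getElem
  · simp
  · intro i h1 h2
    simp [List.getD_eq_getElem?_getD, (by simpa using h2 : i < xs.length)]

-- The central divmod/flatten identity, stated over Nat indices.
theorem range_mul_divmod {α β : Type} (r2 : List α) (d : α) (F : α → α → β) :
    ∀ (r1 : List α),
      (List.range (r1.length * r2.length)).map
        (fun j => F (r1.getD (j / r2.length) d) (r2.getD (j % r2.length) d))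
      = r1.flatMap (fun a => r2.map (F a)) := by
  intro r1
  rcases eq_or_ne r2 [] with rfl | hne
  · simp
  · have hm : 0 < r2.length := List.length_pos_iff.mpr hne
    induction r1 with
    | nil => simp
    | cons h t ih =>
      have hlen : (h :: t).length * r2.length = r2.length + t.length * r2.length := by
        simp [Nat.succ_mul]; ring
      rw [hlen, List.range_add, List.map_append, List.map_map]
      have h1 : (List.range r2.length).map
          (fun j => F ((h :: t).getD (j / r2.length) d) (r2.getD (j % r2.length) d))
          = r2.map (F h) := by
        rw [← map_getD_range r2 d (F h)]
        apply List.map_congr_left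
        intro j hj
        rw [List.mem_range] at hj
        rw [Nat.div_eq_of_lt hj, Nat.mod_eq_of_lt hj, List.getD_cons_zero]
      have h2 : (List.range (t.length * r2.length)).map
          ((fun j => F ((h :: t).getD (j / r2.length) d) (r2.getD (j % r2.length) d)) ∘
            (fun j => r2.length + j))
          = (List.range (t.length * r2.length)).map
            (fun j => F (t.getD (j / r2.length) d) (r2.getD (j % r2.length) d)) := by
        apply List.map_congr_left
        intro j _
        have hdiv : (r2.length + j) / r2.length = j / r2.length + 1 := by
          rw [Nat.add_comm, Nat.add_div_right _ hm]
        have hmod : (r2.length + j) % r2.length = j % r2.length := by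
          rw [Nat.add_comm, Nat.add_mod_right]
        simp [Function.comp, hdiv, hmod]
      rw [h1, h2, ih]
      simp

-- ===== VERDICT (by name: the statement is the Claim_ definition above) =====
theorem pair_regions_py_spec : Claim_equal_pair_regions_py := by
  intro r1 r2 _
  unfold Spec_pair_regions_py pair_regions_py pair_regions_py_alt
  rw [show ((r1.length : Int) * (r2.length : Int)) = ((r1.length * r2.length : Nat) : Int) by push_cast; ring,
      PySem.List.pyRange_zero_nat, List.foldl_map,
      PySem.List.foldl_append_singleton_eq_map, List.nil_append]
  rw [← range_mul_divmod r2 pvB_default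
        (fun a b => (a.1 ++ "-" ++ PySem.Int.toStr a.2.1 ++ "-" ++ PySem.Int.toStr a.2.2.1 ++ "_" ++
                      b.1 ++ "-" ++ PySem.Int.toStr b.2.1 ++ "-" ++ PySem.Int.toStr b.2.2.1,
                     a.2.2.2 ++ ":" ++ b.2.2.2)) r1]
  apply List.map_congr_left
  intro j _
  simp only [pvB_entry, PySem.Int.floordiv_natCast, PySem.Int.mod_natCast,
        PySem.List.pyGetD_natCast, List.getD_eq_getElem?_getD]
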